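-- pv_equiv track=rewrite | github.com/PHILIPP111007/phils_language | src/parser.py | is_fully_parenthesized
-- ===== SOURCE A (Python) =====
-- def is_fully_parenthesized(expression: str) -> bool:
--     """Проверяет, полностью ли выражение заключено в скобки"""
--     if not expression.startswith("(") or not expression.endswith(")"):
--         return False
--
--     # Проверяем баланс скобок
--     balance = 0
--     in_string = False
--     string_char = None
--     escaped = False
--
--     for i, char in enumerate(expression):
--         # Обработка экранирования
--         if escaped:
--             escaped = False
--             continue
--
--         if char == "\\":
--             escaped = True
--             continue
--
--         # Обработка строк
--         if not in_string and char in ['"', "'"]: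
--             in_string = True
--             string_char = char
--         elif in_string and char == string_char:
--             in_string = False
--             string_char = None
--
--         # Обработка скобок (только вне строк)
--         if not in_string:
--             if char == "(":
--                 balance += 1
--             elif char == ")":
--                 balance -= 1
--                 # Если баланс стал 0 до конца строки
--                 if balance == 0 and i < len(expression) - 1:
--                     return False
--
--     return balance == 0
-- ===== SOURCE B (Python) =====
-- def is_fully_parenthesized(expression: str) -> bool:
--     """Index-jumping scanner: instead of a flag-based state machine, walk the
--     string with explicit skip-ahead (skip 2 on a backslash, consume a whole
--     string literal with a nested loop) and find the close paren matching the
--     leading open paren; the expression is fully parenthesized iff that match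
--     is the last character."""
--     n = len(expression)
--     if not (expression.startswith("(") and expression.endswith(")")):
--         return False
--     depth = 0
--     i = 0
--     while i < n:
--         c = expression[i]
--         if c == "\\":
--             i += 2
--         elif c == '"' or c == "'":
--             j = i + 1
--             while j < n:
--                 if expression[j] == "\\":
--                     j += 2
--                 elif expression[j] == c:
--                     j += 1
--                     break
--                 else:
--                     j += 1
--             i = j
--         elif c == "(":
--             depth += 1
--             i += 1
--         elif c == ")":
--             depth -= 1
--             if depth == 0:
--                 return i == n - 1
--             i += 1
--         else:
--             i += 1
--     return False
-- ===== Notes on version B (the rewrite author's own statement) =====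
-- stated objective: alternative
-- what changed: Replaces A's flag-based state machine (in_string/string_char/escaped, balance checked to the end) with an index-jumping scanner: skip 2 on a backslash, consume each string literal with a nested inner loop, track only paren depth, and return whether the close paren matching the leading open paren is the last character.
import Mathlib
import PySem

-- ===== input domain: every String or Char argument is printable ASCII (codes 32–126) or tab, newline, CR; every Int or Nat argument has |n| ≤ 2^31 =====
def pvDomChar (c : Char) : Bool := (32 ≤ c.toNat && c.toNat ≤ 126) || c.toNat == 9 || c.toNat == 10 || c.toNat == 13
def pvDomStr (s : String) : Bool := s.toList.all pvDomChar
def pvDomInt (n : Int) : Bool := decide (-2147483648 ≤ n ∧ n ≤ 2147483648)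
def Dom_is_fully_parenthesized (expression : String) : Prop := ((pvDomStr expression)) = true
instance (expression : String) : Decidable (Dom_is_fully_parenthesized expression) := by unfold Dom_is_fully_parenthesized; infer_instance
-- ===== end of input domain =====

-- B replaces A's flag-based state machine (in_string/string_char/escaped, balance-to-end)
-- with an index-jumping scanner that finds the matching close paren of the leading '('.

-- ===== PORT A =====
-- A's single loop: state (balance, in_string, string_char, escaped), early return
-- when balance hits 0 before the last index.  pvStepA is A's in_string/string_char
-- update ("Обработка строк") factored out verbatim.
def pvStepA (inS : Bool) (sc : Option Char) (c : Char) : Bool × Option Char :=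
  if ¬inS ∧ (c = '"' ∨ c = '\'') then (true, some c)
  else if inS ∧ some c = sc then (false, none)
  else (inS, sc)

def pvLoopA (n : Nat) : List (Int × Char) → Int → Bool → Option Char → Bool → Bool
  | [], bal, _, _, _ => bal == 0
  | (i, c) :: rest, bal, inS, sc, esc =>
    if esc then pvLoopA n rest bal inS sc false
    else if c = '\\' then pvLoopA n rest bal inS sc true
    else
      let st := pvStepA inS sc c
      if st.1 = false then
        if c = '(' then pvLoopA n rest (bal + 1) st.1 st.2 esc
        else if c = ')' then
          if bal - 1 == 0 ∧ i < (n : Int) - 1 then false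
          else pvLoopA n rest (bal - 1) st.1 st.2 esc
        else pvLoopA n rest bal st.1 st.2 esc
      else pvLoopA n rest bal st.1 st.2 esc

def is_fully_parenthesized (expression : String) : Bool :=
  let cs := expression.toList
  if ¬ PySem.Chars.startswith cs ['('] ∨ ¬ PySem.Chars.endswith cs [')'] then false
  else pvLoopA cs.length (PySem.List.enumerate cs 0) 0 false none false

-- ===== PORT B =====
-- B's inner while loop: consume a string literal opened with quote q, starting at j;
-- returns the index just past the closing quote (or past the end).
def pvSkipStr (cs : List Char) (n : Nat) (q : Char) (j : Nat) : Nat :=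
  if _h : j < n then
    if cs.getD j ' ' = '\\' then pvSkipStr cs n q (j + 2)
    else if cs.getD j ' ' = q then j + 1
    else pvSkipStr cs n q (j + 1)
  else j
termination_by n - j

-- the skip never moves backwards (termination of the outer loop cites this)
theorem pvSkipStr_ge (cs : List Char) (n : Nat) (q : Char) (j : Nat) :
    j ≤ pvSkipStr cs n q j := by
  unfold pvSkipStr
  split
  · split
    · have := pvSkipStr_ge cs n q (j + 2); omega
    · split
      · omega
      · have := pvSkipStr_ge cs n q (j + 1); omega
  · omega
termination_by n - j

-- B's outer while loop: index-jumping scan tracking only the paren depth.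
def pvScan (cs : List Char) (n : Nat) (i : Nat) (depth : Int) : Bool :=
  if _h : i < n then
    if cs.getD i ' ' = '\\' then pvScan cs n (i + 2) depth
    else if cs.getD i ' ' = '"' ∨ cs.getD i ' ' = '\'' then pvScan cs n (pvSkipStr cs n (cs.getD i ' ') (i + 1)) depth
    else if cs.getD i ' ' = '(' then pvScan cs n (i + 1) (depth + 1)
    else if cs.getD i ' ' = ')' then
      if depth - 1 == 0 then decide (i = n - 1)
      else pvScan cs n (i + 1) (depth - 1)
    else pvScan cs n (i + 1) depth
  else false
termination_by n - i
decreasing_by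
  · omega
  · have := pvSkipStr_ge cs n (cs.getD i ' ') (i + 1); omega
  · omega
  · omega
  · omega

def is_fully_parenthesized_alt (expression : String) : Bool :=
  let cs := expression.toList
  if PySem.Chars.startswith cs ['('] ∧ PySem.Chars.endswith cs [')'] then
    pvScan cs cs.length 0 0
  else false

-- ===== PRECONDITION & SPEC =====
def Spec_is_fully_parenthesized (expression : String) (out : Bool) : Prop := out = is_fully_parenthesized_alt expression
instance (expression : String) (out : Bool) : Decidable (Spec_is_fully_parenthesized expression out) := by unfold Spec_is_fully_parenthesized; infer_instance

-- ===== CLAIM (what is proved, stated in full; the proofs are below) =====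
def Claim_equal_is_fully_parenthesized : Prop := ∀ (expression : String), Dom_is_fully_parenthesized expression → Spec_is_fully_parenthesized expression (is_fully_parenthesized expression)

-- ===== LEMMAS AND PROOFS =====
theorem pvLoopA_nil (n : Nat) (bal : Int) (inS : Bool) (sc : Option Char) (esc : Bool) :
    pvLoopA n [] bal inS sc esc = (bal == 0) := rfl

theorem pvLoopA_cons (n : Nat) (i : Int) (c : Char) (rest : List (Int × Char))
    (bal : Int) (inS : Bool) (sc : Option Char) (esc : Bool) :
    pvLoopA n ((i, c) :: rest) bal inS sc esc =
      (if esc then pvLoopA n rest bal inS sc false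
       else if c = '\\' then pvLoopA n rest bal inS sc true
       else
         let st := pvStepA inS sc c
         if st.1 = false then
           if c = '(' then pvLoopA n rest (bal + 1) st.1 st.2 esc
           else if c = ')' then
             if bal - 1 == 0 ∧ i < (n : Int) - 1 then false
             else pvLoopA n rest (bal - 1) st.1 st.2 esc
           else pvLoopA n rest bal st.1 st.2 esc
         else pvLoopA n rest bal st.1 st.2 esc) := rfl

theorem pvScan_oob (cs : List Char) (n i : Nat) (depth : Int) (h : ¬ i < n) :
    pvScan cs n i depth = false := by unfold pvScan; simp [h]

theorem pvSkipStr_oob (cs : List Char) (n : Nat) (q : Char) (j : Nat) (h : ¬ j < n) :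
    pvSkipStr cs n q j = j := by unfold pvSkipStr; simp [h]

theorem pvStepA_open (c : Char) (hq : c = '"' ∨ c = '\'') :
    pvStepA false none c = (true, some c) := by simp [pvStepA, hq]

theorem pvStepA_plain (sc : Option Char) (c : Char) (hq : ¬ (c = '"' ∨ c = '\'')) :
    pvStepA false sc c = (false, sc) := by simp [pvStepA, hq]

theorem pvStepA_close (q : Char) : pvStepA true (some q) q = (false, none) := by
  simp [pvStepA]

theorem pvStepA_inside (q c : Char) (h : ¬ c = q) :
    pvStepA true (some q) c = (true, some q) := by simp [pvStepA, h]

-- A's fused state machine agrees with B's index-jumping scan, in both control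
-- positions (normal scanning / inside a string literal opened by q).
theorem pvBridge (cs : List Char) :
    ∀ (k j : Nat), cs.length - j ≤ k →
      (∀ bal : Int, 1 ≤ bal →
        pvLoopA cs.length (PySem.List.enumerate (cs.drop j) (j : Int)) bal false none false
          = pvScan cs cs.length j bal)
      ∧ (∀ (bal : Int) (q : Char), 1 ≤ bal → (q = '"' ∨ q = '\'') →
        pvLoopA cs.length (PySem.List.enumerate (cs.drop j) (j : Int)) bal true (some q) false
          = pvScan cs cs.length (pvSkipStr cs cs.length q j) bal) := by
  intro k
  induction k with
  | zero =>
    intro j hj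
    have hnj : ¬ j < cs.length := by omega
    have hd : cs.drop j = [] := List.drop_eq_nil_iff.mpr (by omega)
    refine ⟨fun bal hb => ?_, fun bal q hb _ => ?_⟩
    · rw [hd, pvScan_oob _ _ _ _ hnj]
      simp [PySem.List.enumerate_nil, pvLoopA_nil]; omega
    · rw [hd, pvSkipStr_oob _ _ _ _ hnj, pvScan_oob _ _ _ _ hnj]
      simp [PySem.List.enumerate_nil, pvLoopA_nil]; omega
  | succ k ih =>
    intro j hj
    by_cases hjn : j < cs.length
    case neg =>
      have hd : cs.drop j = [] := List.drop_eq_nil_iff.mpr (by omega)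
      refine ⟨fun bal hb => ?_, fun bal q hb _ => ?_⟩
      · rw [hd, pvScan_oob _ _ _ _ hjn]
        simp [PySem.List.enumerate_nil, pvLoopA_nil]; omega
      · rw [hd, pvSkipStr_oob _ _ _ _ hjn, pvScan_oob _ _ _ _ hjn]
        simp [PySem.List.enumerate_nil, pvLoopA_nil]; omega
    case pos =>
      have hd : cs.drop j = cs[j] :: cs.drop (j + 1) := List.drop_eq_getElem_cons hjn
      have hg : cs.getD j ' ' = cs[j] := List.getD_eq_getElem cs ' ' hjn
      refine ⟨fun bal hb => ?_, fun bal q hb hq => ?_⟩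
      · -- normal state
        rw [hd, PySem.List.enumerate_cons, pvLoopA_cons, if_neg (by simp)]
        unfold pvScan
        rw [dif_pos hjn, hg]
        by_cases hbs : cs[j] = '\\'
        · rw [if_pos hbs, if_pos hbs]
          by_cases hj1 : j + 1 < cs.length
          · have hd2 : cs.drop (j + 1) = cs[j + 1] :: cs.drop (j + 2) :=
              List.drop_eq_getElem_cons hj1
            rw [hd2, PySem.List.enumerate_cons, pvLoopA_cons, if_pos rfl]
            have h' := (ih (j + 2) (by omega)).1 bal hb
            push_cast at h'
            rw [show ((j : Int) + 1 + 1) = (j : Int) + 2 by ring]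
            exact h'
          · have hd2 : cs.drop (j + 1) = [] := List.drop_eq_nil_iff.mpr (by omega)
            rw [hd2, PySem.List.enumerate_nil, pvLoopA_nil,
                pvScan_oob _ _ _ _ (by omega : ¬ j + 2 < cs.length)]
            simp; omega
        · rw [if_neg hbs, if_neg hbs]
          by_cases hq' : cs[j] = '"' ∨ cs[j] = '\''
          · rw [if_pos hq']
            simp only [pvStepA_open cs[j] hq']
            rw [if_neg (by simp)]
            have h' := (ih (j + 1) (by omega)).2 bal cs[j] hb hq'
            push_cast at h'
            exact h'
          · rw [if_neg hq']
            simp only [pvStepA_plain none cs[j] hq']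
            rw [if_pos (by trivial)]
            by_cases hop : cs[j] = '('
            · rw [if_pos hop, if_pos hop]
              have h' := (ih (j + 1) (by omega)).1 (bal + 1) (by omega)
              push_cast at h'
              exact h'
            · rw [if_neg hop, if_neg hop]
              by_cases hcl : cs[j] = ')'
              · rw [if_pos hcl, if_pos hcl]
                by_cases hz : bal - 1 = 0
                · rw [if_pos (show (bal - 1 == 0) = true by simp [hz])]
                  by_cases hlt : (j : Int) < (cs.length : Int) - 1
                  · -- balance hits 0 before the last index: both sides false
                    rw [if_pos (show (bal - 1 == 0) = true ∧ (j : Int) < (cs.length : Int) - 1 from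
                      ⟨by simp [hz], hlt⟩)]
                    simp [show ¬ j = cs.length - 1 by omega]
                  · -- balance hits 0 at the last index: rest is empty, both true
                    rw [if_neg (show ¬ ((bal - 1 == 0) = true ∧ (j : Int) < (cs.length : Int) - 1) from
                      fun h => hlt h.2)]
                    have hd2 : cs.drop (j + 1) = [] := List.drop_eq_nil_iff.mpr (by omega)
                    rw [hd2, PySem.List.enumerate_nil, pvLoopA_nil]
                    simp [hz, show j = cs.length - 1 by omega]
                · rw [if_neg (show ¬ ((bal - 1 == 0) = true ∧ (j : Int) < (cs.length : Int) - 1) from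
                      fun h => hz (by simpa using h.1)),
                      if_neg (show ¬ (bal - 1 == 0) = true by simpa using hz)]
                  have h' := (ih (j + 1) (by omega)).1 (bal - 1) (by omega)
                  push_cast at h'
                  exact h'
              · rw [if_neg hcl, if_neg hcl]
                have h' := (ih (j + 1) (by omega)).1 bal hb
                push_cast at h'
                exact h'
      · -- inside a string literal opened by q
        rw [hd, PySem.List.enumerate_cons, pvLoopA_cons, if_neg (by simp)]
        unfold pvSkipStr
        rw [dif_pos hjn, hg]
        by_cases hbs : cs[j] = '\\'
        · rw [if_pos hbs, if_pos hbs]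
          by_cases hj1 : j + 1 < cs.length
          · have hd2 : cs.drop (j + 1) = cs[j + 1] :: cs.drop (j + 2) :=
              List.drop_eq_getElem_cons hj1
            rw [hd2, PySem.List.enumerate_cons, pvLoopA_cons, if_pos rfl]
            have h' := (ih (j + 2) (by omega)).2 bal q hb hq
            push_cast at h'
            rw [show ((j : Int) + 1 + 1) = (j : Int) + 2 by ring]
            exact h'
          · have hd2 : cs.drop (j + 1) = [] := List.drop_eq_nil_iff.mpr (by omega)
            have hsk : pvSkipStr cs cs.length q (j + 2) = j + 2 :=
              pvSkipStr_oob _ _ _ _ (by omega)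
            rw [hd2, PySem.List.enumerate_nil, pvLoopA_nil, hsk,
                pvScan_oob _ _ _ _ (by omega : ¬ j + 2 < cs.length)]
            simp; omega
        · rw [if_neg hbs, if_neg hbs]
          by_cases hcq : cs[j] = q
          · rw [if_pos hcq, hcq]
            simp only [pvStepA_close q]
            rw [if_pos (by trivial),
                if_neg (show ¬ q = '(' by rcases hq with h | h <;> (subst h; decide)),
                if_neg (show ¬ q = ')' by rcases hq with h | h <;> (subst h; decide))]
            have h' := (ih (j + 1) (by omega)).1 bal hb
            push_cast at h'
            exact h'
          · rw [if_neg hcq]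
            simp only [pvStepA_inside q cs[j] hcq]
            rw [if_neg (by simp)]
            have h' := (ih (j + 1) (by omega)).2 bal q hb hq
            push_cast at h'
            exact h'

-- ===== VERDICT (by name: the statement is the Claim_ definition above) =====
theorem is_fully_parenthesized_spec : Claim_equal_is_fully_parenthesized := by
  intro expression _
  unfold Spec_is_fully_parenthesized is_fully_parenthesized is_fully_parenthesized_alt
  by_cases h : PySem.Chars.startswith expression.toList ['('] = true ∧
               PySem.Chars.endswith expression.toList [')'] = true
  case neg =>
    rw [not_and_or] at h
    rcases h with h | h <;> simp [h]
  case pos =>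
    obtain ⟨h1, h2⟩ := h
    simp only [h1, h2, not_true, or_self, if_pos, and_self, if_false]
    obtain ⟨tl, htl⟩ : ∃ tl, expression.toList = '(' :: tl := by
      rcases (PySem.Chars.startswith_iff _ _).mp h1 with ⟨t, ht⟩
      exact ⟨t, ht.symm⟩
    -- one step on each side, then the bridge at j = 1
    rw [htl, PySem.List.enumerate_cons, pvLoopA_cons, if_neg (by simp), if_neg (by decide)]
    simp only [pvStepA_plain none '(' (by decide)]
    rw [if_pos (by trivial), if_pos (by decide)]
    unfold pvScan
    rw [dif_pos (show 0 < ('(' :: tl).length by simp),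
        show ('(' :: tl).getD 0 ' ' = '(' from rfl,
        if_neg (by decide), if_neg (by decide), if_pos rfl]
    have h' := (pvBridge ('(' :: tl) ('(' :: tl).length 1 (by omega)).1 (0 + 1) (by omega)
    simpa using h'
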